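-- pv_equiv track=rewrite | github.com/AakashYadv/GeoPersona | src/pipeline.py | merge_tracks_by_overlap
-- ===== SOURCE A (Python) =====
-- def merge_tracks_by_overlap(trajectories):
--     merged = {}
--     used = set()
--
--     ids = list(trajectories.keys())
--
--     for i in range(len(ids)):
--         if ids[i] in used:
--             continue
--
--         base = ids[i]
--         merged[base] = trajectories[base]
--         used.add(base)
--
--         for j in range(i + 1, len(ids)):
--             if ids[j] in used:
--                 continue
--
--             # Compare last point of base with first point of next
--             if trajectories[base][-1][:2] == trajectories[ids[j]][0][:2]:
--                 merged[base] += trajectories[ids[j]]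
--                 used.add(ids[j])
--
--     return merged
-- ===== SOURCE B (Python) =====
-- # Faster re-implementation: index every track's start point in a hash map once,
-- # then extend each chain by hash lookup (earliest later unused match) instead of
-- # rescanning all remaining tracks. Return-value equivalence only: A extends the
-- # caller's point lists in place, B never mutates its argument.
-- def merge_tracks_by_overlap(trajectories):
--     ids = list(trajectories.keys())
--     tracks = [trajectories[t] for t in ids]
--     by_start = {}
--     for k, pts in enumerate(tracks):
--         if pts:
--             by_start.setdefault(tuple(pts[0][:2]), []).append(k)
--
--     merged = {}
--     used = set()
--     for i, base in enumerate(ids):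
--         if base in used:
--             continue
--         used.add(base)
--         chain = list(tracks[i])
--         last = i
--         while True:
--             bucket = by_start.get(tuple(chain[-1][:2]), ())
--             nxt = next((k for k in bucket if k > last and ids[k] not in used), None)
--             if nxt is None:
--                 break
--             used.add(ids[nxt])
--             chain = chain + tracks[nxt]
--             last = nxt
--         merged[base] = chain
--     return merged
-- ===== Notes on version B (the rewrite author's own statement) =====
-- stated objective: faster
-- what changed: B builds a hash index from each track's start point to the ascending list of track indices once, then extends each chain by looking up its current end point in that index (taking the earliest later unused match), replacing A's rescan of all remaining tracks after every merge.
-- outside the precondition, e.g. on merge_tracks_by_overlap({1: []}): A returns {1: []}, B raises IndexError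
import Mathlib
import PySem

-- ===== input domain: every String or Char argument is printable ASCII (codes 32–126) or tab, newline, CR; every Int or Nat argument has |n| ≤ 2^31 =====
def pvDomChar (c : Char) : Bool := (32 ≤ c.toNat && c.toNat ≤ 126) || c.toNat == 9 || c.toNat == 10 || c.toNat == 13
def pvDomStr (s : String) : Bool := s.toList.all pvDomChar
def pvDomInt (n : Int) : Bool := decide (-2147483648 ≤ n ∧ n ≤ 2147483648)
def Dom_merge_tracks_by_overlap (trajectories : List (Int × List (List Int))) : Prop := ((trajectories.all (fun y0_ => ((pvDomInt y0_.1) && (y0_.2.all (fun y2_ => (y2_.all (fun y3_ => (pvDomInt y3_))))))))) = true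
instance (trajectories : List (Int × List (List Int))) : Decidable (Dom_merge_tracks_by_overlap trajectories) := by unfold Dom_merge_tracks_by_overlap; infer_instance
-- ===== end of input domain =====

-- B replaces A's quadratic rescans by a hash index of track start points; equivalence is about
-- the RETURN value only (A extends the caller's point lists in place, B never mutates its argument).

-- ===== PORT A =====
-- shared helpers: c[-1][:2] and c[0][:2] (default [] is unreachable under Pre_: point lists are nonempty)
def pvEndKey (c : List (List Int)) : List Int := ((PySem.List.pyGet? c (-1)).getD []).take 2
def pvStartKey (c : List (List Int)) : List Int := ((PySem.List.pyGet? c 0).getD []).take 2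

abbrev pvTraj := PySem.Dict Int (List (List Int))

-- body of A's inner 'for j in range(i+1, len(ids))' loop; state = (merged, used, trajectories)
-- ('merged[base] += …' extends the list object shared by merged[base] and trajectories[base],
--  so both dicts are updated at key base)
def pvAStep (ids : List Int) (base : Int)
    (s : pvTraj × PySem.Set Int × pvTraj) (j : Int) : pvTraj × PySem.Set Int × pvTraj :=
  let idj := PySem.List.pyGetD ids j 0
  if PySem.Set.contains s.2.1 idj then s
  else if pvEndKey (s.2.2.getD base []) = pvStartKey (s.2.2.getD idj []) then
    let c := s.2.2.getD base [] ++ s.2.2.getD idj []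
    (s.1.insert base c, PySem.Set.add s.2.1 idj, s.2.2.insert base c)
  else s

-- body of A's outer 'for i in range(len(ids))' loop
def pvAOuter (ids : List Int)
    (s : pvTraj × PySem.Set Int × pvTraj) (i : Int) : pvTraj × PySem.Set Int × pvTraj :=
  let base := PySem.List.pyGetD ids i 0
  if PySem.Set.contains s.2.1 base then s
  else
    let m := s.1.insert base (s.2.2.getD base [])
    let u := PySem.Set.add s.2.1 base
    (PySem.List.pyRange (i + 1) (PySem.List.len ids) 1).foldl (pvAStep ids base) (m, u, s.2.2)

def merge_tracks_by_overlap (trajectories : List (Int × List (List Int))) : List (Int × List (List Int)) :=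
  let traj : pvTraj := ⟨trajectories⟩
  let ids := traj.keys
  ((PySem.List.pyRange 0 (PySem.List.len ids) 1).foldl (pvAOuter ids)
      (⟨[]⟩, PySem.Set.empty, traj)).1.items

-- ===== PORT B =====
-- by_start: hash index start-point ↦ ascending list of track indices ('setdefault(key, []).append(k)')
def pvByStart (tracks : List (List (List Int))) : PySem.Dict (List Int) (List Int) :=
  (PySem.List.enumerate tracks 0).foldl
    (fun d p => if p.2 ≠ [] then d.modify (pvStartKey p.2) [] (· ++ [p.1]) else d) ⟨[]⟩

-- B's 'while True' chain-extension loop (fuel = len(tracks) bounds the iterations: each one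
-- strictly increases 'last', which stays below len(tracks))
def pvChain (ids : List Int) (tracks : List (List (List Int))) (byStart : PySem.Dict (List Int) (List Int)) :
    Nat → List (List Int) → PySem.Set Int → Int → List (List Int) × PySem.Set Int
  | 0, chain, used, _ => (chain, used)
  | fuel + 1, chain, used, last =>
    let bucket := byStart.getD (pvEndKey chain) []
    match bucket.find? (fun k => decide (last < k) && !(PySem.Set.contains used (PySem.List.pyGetD ids k 0))) with
    | none => (chain, used)
    | some k => pvChain ids tracks byStart fuel (chain ++ PySem.List.pyGetD tracks k [])
        (PySem.Set.add used (PySem.List.pyGetD ids k 0)) k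

-- body of B's 'for i, base in enumerate(ids)' loop; state = (merged, used)
def pvBOuter (ids : List Int) (tracks : List (List (List Int))) (byStart : PySem.Dict (List Int) (List Int))
    (s : pvTraj × PySem.Set Int) (p : Int × Int) : pvTraj × PySem.Set Int :=
  if PySem.Set.contains s.2 p.2 then s
  else
    let used := PySem.Set.add s.2 p.2
    let r := pvChain ids tracks byStart tracks.length (PySem.List.pyGetD tracks p.1 []) used p.1
    (s.1.insert p.2 r.1, r.2)

def merge_tracks_by_overlap_alt (trajectories : List (Int × List (List Int))) : List (Int × List (List Int)) :=
  let traj : pvTraj := ⟨trajectories⟩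
  let ids := traj.keys
  let tracks := ids.map (fun t => traj.getD t [])
  let byStart := pvByStart tracks
  ((PySem.List.enumerate ids 0).foldl (pvBOuter ids tracks byStart)
      (⟨[]⟩, PySem.Set.empty)).1.items

-- ===== PRECONDITION & SPEC =====
-- Pre_ excludes inputs with an empty point list, on which A (and B) hit IndexError on
-- trajectories[...][-1] / [0] whenever that list is compared (A happens to return the input
-- unscathed when the empty list is never compared, e.g. {1: []}; B raises there);
-- it also requires distinct keys, which every image of a real Python dict has.
def Pre_merge_tracks_by_overlap (trajectories : List (Int × List (List Int))) : Prop :=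
  (trajectories.map Prod.fst).Nodup ∧ ∀ p ∈ trajectories, p.2 ≠ []
instance (trajectories : List (Int × List (List Int))) : Decidable (Pre_merge_tracks_by_overlap trajectories) := by
  unfold Pre_merge_tracks_by_overlap; infer_instance

def pvWitness_merge_tracks_by_overlap : (List (Int × List (List Int))) :=
  [(1, [[0, 0], [1, 1]]), (2, [[1, 1], [2, 2]]), (3, [[5, 5]])]

def Spec_merge_tracks_by_overlap (trajectories : List (Int × List (List Int))) (out : List (Int × List (List Int))) : Prop := out = merge_tracks_by_overlap_alt trajectories
instance (trajectories : List (Int × List (List Int))) (out : List (Int × List (List Int))) : Decidable (Spec_merge_tracks_by_overlap trajectories out) := by unfold Spec_merge_tracks_by_overlap; infer_instance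

-- ===== CLAIM (what is proved, stated in full; the proofs are below) =====
def Claim_equal_merge_tracks_by_overlap : Prop := ∀ (trajectories : List (Int × List (List Int))), Dom_merge_tracks_by_overlap trajectories → Pre_merge_tracks_by_overlap trajectories → Spec_merge_tracks_by_overlap trajectories (merge_tracks_by_overlap trajectories)

-- ===== LEMMAS AND PROOFS =====

-- overwriting a key twice is overwriting it once
lemma pv_insert_insert {κ ν : Type} [BEq κ] [LawfulBEq κ] (d : PySem.Dict κ ν) (k : κ) (v w : ν) :
    (d.insert k v).insert k w = d.insert k w := by
  obtain ⟨l⟩ := d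
  by_cases hc : (PySem.Dict.mk l).contains k = true
  · have h1 : (PySem.Dict.mk l).insert k v = ⟨l.map (fun p => if p.1 == k then (k, v) else p)⟩ := by
      simp [PySem.Dict.insert, hc]
    have hc2 : (PySem.Dict.mk (l.map (fun p => if p.1 == k then (k, v) else p))).contains k = true := by
      simp only [PySem.Dict.contains, List.any_map] at hc ⊢
      simp only [List.any_eq_true] at hc ⊢
      obtain ⟨p, hp, hpk⟩ := hc
      exact ⟨p, hp, by simp [Function.comp, hpk]⟩
    rw [h1]
    simp only [PySem.Dict.insert, hc2, hc, if_pos]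
    congr 1
    rw [List.map_map]
    apply List.map_congr_left
    intro p _
    by_cases hpk : p.1 == k
    · simp [Function.comp, hpk]
    · simp [Function.comp, hpk]
  · have h1 : (PySem.Dict.mk l).insert k v = ⟨l ++ [(k, v)]⟩ := by
      simp [PySem.Dict.insert, hc]
    have hc2 : (PySem.Dict.mk (l ++ [(k, v)])).contains k = true := by
      simp [PySem.Dict.contains]
    rw [h1]
    simp only [PySem.Dict.insert, hc2, hc, if_pos, if_neg, Bool.not_eq_true]
    have hall : ∀ p ∈ l, (p.1 == k) = false := by
      intro p hp
      simp only [PySem.Dict.contains, List.any_eq_true] at hc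
      push Not at hc
      simpa using hc p hp
    congr 1
    rw [List.map_append]
    have h2 : l.map (fun p => if p.1 == k then (k, w) else p) = l := by
      rw [show l = l.map id by simp]
      rw [List.map_map]
      apply List.map_congr_left
      intro p hp
      simp [hall p (by simpa using hp)]
    rw [h2]
    simp

-- re-inserting the value a key already holds changes nothing (keys distinct)
lemma pv_insert_self {κ ν : Type} [BEq κ] [LawfulBEq κ] (d : PySem.Dict κ ν) (k : κ) (v : ν)
    (hnd : d.keys.Nodup) (h : d.get? k = some v) : d.insert k v = d := by
  obtain ⟨l⟩ := d
  induction l with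
  | nil => simp [PySem.Dict.get?] at h
  | cons x xs ih =>
    by_cases hx : (x.1 == k) = true
    · have hxk : x.1 = k := by simpa using hx
      have hv : x.2 = v := by
        simp [PySem.Dict.get?, hx] at h
        exact h
      have hnotin : ∀ p ∈ xs, (p.1 == k) = false := by
        intro p hp
        simp only [PySem.Dict.keys, List.map_cons, List.nodup_cons] at hnd
        have : p.1 ∈ xs.map Prod.fst := List.mem_map_of_mem hp
        by_contra hbad
        have : (p.1 : κ) = k := by simpa using hbad
        exact hnd.1 (by rw [hxk, ← this]; exact List.mem_map_of_mem hp)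
      have hcont : (PySem.Dict.mk (x :: xs)).contains k = true := by
        simp [PySem.Dict.contains, hx]
      simp only [PySem.Dict.insert, hcont, if_pos]
      congr 1
      simp only [List.map_cons, hx, if_pos]
      have h2 : xs.map (fun p => if p.1 == k then (k, v) else p) = xs := by
        conv_rhs => rw [← List.map_id xs]
        apply List.map_congr_left
        intro p hp
        simp [hnotin p hp]
      rw [h2]
      have : x = (k, v) := by
        obtain ⟨a, b⟩ := x
        simp at hxk hv
        rw [hxk, hv]
      rw [this]
    · have h' : (PySem.Dict.mk xs).get? k = some v := by
        simpa [PySem.Dict.get?, List.find?_cons, hx] using h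
      have hnd' : (PySem.Dict.mk xs).keys.Nodup := by
        simp only [PySem.Dict.keys, List.map_cons, List.nodup_cons] at hnd
        exact hnd.2
      have ihx := ih hnd' h'
      have hcontxs : (PySem.Dict.mk xs).contains k = true := by
        simp only [PySem.Dict.contains, List.any_eq_true]
        cases hf : xs.find? (fun p => p.1 == k) with
        | none => simp [PySem.Dict.get?, hf] at h'
        | some e =>
          exact ⟨e, List.mem_of_find?_eq_some hf, List.find?_some (p := fun p : κ × ν => p.1 == k) hf⟩
      have hcont : (PySem.Dict.mk (x :: xs)).contains k = true := by
        simp only [PySem.Dict.contains] at hcontxs ⊢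
        simp [List.any_cons, hcontxs]
      simp only [PySem.Dict.insert, hcont, hcontxs, if_pos] at ihx ⊢
      simp only [PySem.Dict.mk.injEq] at ihx ⊢
      simp [List.map_cons, hx, ihx]

-- find? only looks at members
lemma pv_find?_congr_mem {α : Type} (l : List α) (p q : α → Bool)
    (h : ∀ x ∈ l, p x = q x) : l.find? p = l.find? q := by
  induction l with
  | nil => rfl
  | cons x xs ih =>
    rw [List.find?_cons, List.find?_cons, h x List.mem_cons_self]
    cases q x
    · exact ih (fun y hy => h y (List.mem_cons_of_mem x hy))
    · rfl

-- on a strictly increasing list, find? returns a member that holds if everything below it fails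
lemma pv_find?_sorted (l : List Int) (p : Int → Bool) (a : Int)
    (hs : l.Pairwise (· < ·)) (ha : a ∈ l) (hp : p a = true)
    (hb : ∀ b ∈ l, b < a → p b = false) : l.find? p = some a := by
  induction l with
  | nil => simp at ha
  | cons x xs ih =>
    rcases List.mem_cons.mp ha with h1 | h2
    · subst h1
      rw [List.find?_cons, hp]
    · have hxa : x < a := (List.pairwise_cons.mp hs).1 a h2
      rw [List.find?_cons, hb x List.mem_cons_self hxa]
      exact ih (List.pairwise_cons.mp hs).2 h2 (fun b hbx hba => hb b (List.mem_cons_of_mem x hbx) hba)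

lemma pv_bucket_aux (xs : List (List (List Int))) :
    ∀ (s : Int) (d : PySem.Dict (List Int) (List Int)) (E : List Int),
    ((PySem.List.enumerate xs s).foldl
        (fun d p => if p.2 ≠ [] then d.modify (pvStartKey p.2) [] (· ++ [p.1]) else d) d).getD E []
      = d.getD E [] ++ (List.range xs.length).filterMap
          (fun j => if xs.getD j [] ≠ [] ∧ pvStartKey (xs.getD j []) = E then some (s + (j : Int)) else none) := by
  induction xs with
  | nil => intro s d E; simp [PySem.List.enumerate]
  | cons x xs ih =>
    intro s d E
    rw [PySem.List.enumerate_cons, List.foldl_cons]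
    rw [ih (s + 1)]
    rw [List.length_cons, List.range_succ_eq_map]
    rw [List.filterMap_cons, List.filterMap_map]
    have hfc : List.filterMap ((fun j => if (x :: xs).getD j [] ≠ [] ∧ pvStartKey ((x :: xs).getD j []) = E then some (s + (j : Int)) else none) ∘ Nat.succ) (List.range xs.length)
        = List.filterMap (fun j => if xs.getD j [] ≠ [] ∧ pvStartKey (xs.getD j []) = E then some (s + 1 + (j : Int)) else none) (List.range xs.length) := by
      apply List.filterMap_congr
      intro j hj
      have harr : s + (((j : Nat) + 1 : Nat) : Int) = s + 1 + (j : Int) := by push_cast; ring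
      simp only [Function.comp, List.getD_cons_succ, Nat.succ_eq_add_one, harr]
    rw [hfc]
    by_cases hx : x = []
    · simp [hx]
    · by_cases hE : pvStartKey x = E
      · simp only [List.getD_cons_zero, hx, ne_eq, not_false_eq_true, hE, and_self, if_pos]
        rw [PySem.Dict.getD_modify_self]
        rw [List.append_assoc]
        norm_num
      · simp only [List.getD_cons_zero, hx, ne_eq, not_false_eq_true, hE, and_false, if_neg,
          if_true]
        rw [PySem.Dict.getD_modify]
        rw [if_neg (fun h => hE h.symm)]

-- the bucket of E lists exactly the (ascending) indices of nonempty tracks starting at E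
lemma pv_bucket_eq (tracks : List (List (List Int))) (E : List Int) :
    (pvByStart tracks).getD E []
      = (List.range tracks.length).filterMap
          (fun j => if tracks.getD j [] ≠ [] ∧ pvStartKey (tracks.getD j []) = E then some ((j : Int)) else none) := by
  rw [pvByStart, pv_bucket_aux]
  simp [PySem.Dict.getD, PySem.Dict.get?]

lemma pv_mem_bucket (tracks : List (List (List Int))) (E : List Int) (x : Int) :
    x ∈ (pvByStart tracks).getD E []
      ↔ ∃ j, j < tracks.length ∧ x = (j : Int) ∧ tracks.getD j [] ≠ [] ∧ pvStartKey (tracks.getD j []) = E := by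
  rw [pv_bucket_eq]
  simp only [List.mem_filterMap, List.mem_range, Option.ite_none_right_eq_some, Option.some.injEq]
  constructor
  · rintro ⟨j, hj, ⟨h1, h2⟩, h3⟩
    exact ⟨j, hj, h3.symm, h1, h2⟩
  · rintro ⟨j, hj, h3, h1, h2⟩
    exact ⟨j, hj, ⟨h1, h2⟩, h3.symm⟩

lemma pv_bucket_sorted (tracks : List (List (List Int))) (E : List Int) :
    ((pvByStart tracks).getD E []).Pairwise (· < ·) := by
  rw [pv_bucket_eq]
  apply List.Pairwise.filterMap
  · intro a a' haa b hb b' hb'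
    simp only [Option.ite_none_right_eq_some, Option.some.injEq] at hb hb'
    rw [← hb.2, ← hb'.2]
    exact_mod_cast haa
  · exact List.pairwise_lt_range

-- the chain loop only ever adds to 'used'
lemma pv_chain_mono (ids : List Int) (tracks : List (List (List Int))) (byStart : PySem.Dict (List Int) (List Int)) :
    ∀ (fuel : Nat) (c : List (List Int)) (u : PySem.Set Int) (last : Int) (x : Int),
      PySem.Set.contains u x = true →
      PySem.Set.contains (pvChain ids tracks byStart fuel c u last).2 x = true := by
  intro fuel
  induction fuel with
  | zero => intro c u last x h; simpa [pvChain] using h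
  | succ f ih =>
    intro c u last x h
    rw [pvChain]
    cases hf : ((byStart.getD (pvEndKey c) []).find?
        (fun k => decide (last < k) && !(PySem.Set.contains u (PySem.List.pyGetD ids k 0)))) with
    | none => simpa using h
    | some k =>
      apply ih
      rw [PySem.Set.contains_iff] at h ⊢
      exact (PySem.Set.mem_add _ _ _).mpr (Or.inl h)

-- a failed candidate at index a lets the chain loop's lower bound advance from a-1 to a
lemma pv_chain_shift (ids : List Int) (tracks : List (List (List Int))) (f : Nat)
    (c : List (List Int)) (u : PySem.Set Int) (a : Nat)
    (h : (↑a : Int) ∈ (pvByStart tracks).getD (pvEndKey c) [] →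
      PySem.Set.contains u (PySem.List.pyGetD ids (↑a) 0) = true) :
    pvChain ids tracks (pvByStart tracks) (f + 1) c u ((↑a : Int) - 1)
      = pvChain ids tracks (pvByStart tracks) (f + 1) c u (↑a : Int) := by
  rw [pvChain, pvChain]
  have hfind : ((pvByStart tracks).getD (pvEndKey c) []).find?
        (fun k => decide (((↑a : Int) - 1) < k) && !(PySem.Set.contains u (PySem.List.pyGetD ids k 0)))
      = ((pvByStart tracks).getD (pvEndKey c) []).find?
        (fun k => decide ((↑a : Int) < k) && !(PySem.Set.contains u (PySem.List.pyGetD ids k 0))) := by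
    apply pv_find?_congr_mem
    intro x hx
    by_cases hxa : x = (↑a : Int)
    · subst hxa
      rw [h hx]
      simp
    · have : decide ((↑a : Int) - 1 < x) = decide ((↑a : Int) < x) :=
        decide_eq_decide.mpr (by omega)
      rw [this]
  simp only [hfind]

-- MAIN INNER LEMMA: A's inner scan from index a equals B's hash-lookup chain loop
lemma pvInnerEq (ids : List Int) (tracks : List (List (List Int)))
    (hlen : tracks.length = ids.length)
    (hne : ∀ k, k < ids.length → tracks.getD k [] ≠ [])
    (base : Int) :
    ∀ (a fuel : Nat) (c : List (List Int)) (u : PySem.Set Int) (m t : pvTraj),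
      ids.length ≤ a + fuel →
      PySem.Set.contains u base = true →
      t.keys.Nodup →
      t.get? base = some c →
      (∀ k, k < ids.length → PySem.Set.contains u (ids.getD k 0) = false →
        t.get? (ids.getD k 0) = some (tracks.getD k [])) →
      (PySem.List.pyRange (↑a) (↑ids.length) 1).foldl (pvAStep ids base) (m.insert base c, u, t)
        = (m.insert base (pvChain ids tracks (pvByStart tracks) fuel c u (↑a - 1)).1,
           (pvChain ids tracks (pvByStart tracks) fuel c u (↑a - 1)).2,
           t.insert base (pvChain ids tracks (pvByStart tracks) fuel c u (↑a - 1)).1) := by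
  suffices H : ∀ (b a fuel : Nat) (c : List (List Int)) (u : PySem.Set Int) (m t : pvTraj),
      ids.length - a = b →
      ids.length ≤ a + fuel →
      PySem.Set.contains u base = true →
      t.keys.Nodup →
      t.get? base = some c →
      (∀ k, k < ids.length → PySem.Set.contains u (ids.getD k 0) = false →
        t.get? (ids.getD k 0) = some (tracks.getD k [])) →
      (PySem.List.pyRange (↑a) (↑ids.length) 1).foldl (pvAStep ids base) (m.insert base c, u, t)
        = (m.insert base (pvChain ids tracks (pvByStart tracks) fuel c u (↑a - 1)).1,
           (pvChain ids tracks (pvByStart tracks) fuel c u (↑a - 1)).2,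
           t.insert base (pvChain ids tracks (pvByStart tracks) fuel c u (↑a - 1)).1) by
    intro a fuel c u m t h1 h2 h3 h4 h5
    exact H (ids.length - a) a fuel c u m t rfl h1 h2 h3 h4 h5
  intro b
  induction b with
  | zero =>
    intro a fuel c u m t hb hf hub hnd hgb hinv
    have hna : ids.length ≤ a := by omega
    rw [PySem.List.pyRange_one_eq_nil (by exact_mod_cast hna)]
    have hstuck : pvChain ids tracks (pvByStart tracks) fuel c u (↑a - 1) = (c, u) := by
      cases fuel with
      | zero => rfl
      | succ f =>
        rw [pvChain]
        have hnone : ((pvByStart tracks).getD (pvEndKey c) []).find?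
            (fun k => decide (((↑a : Int) - 1) < k) && !(PySem.Set.contains u (PySem.List.pyGetD ids k 0))) = none := by
          rw [List.find?_eq_none]
          intro x hx
          obtain ⟨j, hj, rfl, -, -⟩ := (pv_mem_bucket tracks (pvEndKey c) x).mp hx
          have : j < ids.length := by omega
          simp only [Bool.and_eq_true, decide_eq_true_eq, not_and]
          intro hlt
          omega
        simp only [hnone]
    rw [hstuck]
    simp only [List.foldl_nil]
    rw [pv_insert_self t base c hnd hgb]
  | succ n ih =>
    intro a fuel c u m t hb hf hub hnd hgb hinv
    have haN : a < ids.length := by omega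
    cases fuel with
    | zero => omega
    | succ f =>
    rw [PySem.List.pyRange_one_cons (by exact_mod_cast haN)]
    rw [List.foldl_cons]
    have hga : PySem.List.pyGetD ids (↑a) 0 = ids.getD a 0 := by
      simp
    have hgbD : t.getD base [] = c := by
      rw [PySem.Dict.getD_eq_get?_getD, hgb]; rfl
    by_cases hused : PySem.Set.contains u (ids.getD a 0) = true
    · -- ids[a] already used: A skips; the bucket search skips it too
      have hstep : pvAStep ids base (m.insert base c, u, t) (↑a) = (m.insert base c, u, t) := by
        rw [pvAStep]
        simp only [hga]
        rw [if_pos hused]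
      rw [hstep]
      have h' := ih (a + 1) (f + 1) c u m t (by omega) (by omega) hub hnd hgb hinv
      push_cast at h'
      have h2 : ((↑a : Int) + 1 - 1) = (↑a : Int) := by ring
      rw [h2] at h'
      rw [h']
      rw [pv_chain_shift ids tracks f c u a (fun _ => by rw [hga]; exact hused)]
    · have hused' : PySem.Set.contains u (ids.getD a 0) = false := by
        simpa using hused
      have hgjD : t.getD (ids.getD a 0) [] = tracks.getD a [] := by
        rw [PySem.Dict.getD_eq_get?_getD, hinv a haN hused']; rfl
      by_cases hkey : pvEndKey c = pvStartKey (tracks.getD a [])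
      · -- match: A extends the chain at index a; the bucket search returns a
        have hstep : pvAStep ids base (m.insert base c, u, t) (↑a)
            = ((m.insert base c).insert base (c ++ tracks.getD a []),
               PySem.Set.add u (ids.getD a 0), t.insert base (c ++ tracks.getD a [])) := by
          rw [pvAStep]
          simp only [hga]
          rw [if_neg (by rw [hused']; exact Bool.false_ne_true)]
          simp only [hgbD, hgjD]
          rw [if_pos hkey]
        rw [hstep, pv_insert_insert]
        have hub' : PySem.Set.contains (PySem.Set.add u (ids.getD a 0)) base = true := by
          rw [PySem.Set.contains_iff] at hub ⊢
          exact (PySem.Set.mem_add _ _ _).mpr (Or.inl hub)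
        have hinv' : ∀ k, k < ids.length →
            PySem.Set.contains (PySem.Set.add u (ids.getD a 0)) (ids.getD k 0) = false →
            (t.insert base (c ++ tracks.getD a [])).get? (ids.getD k 0) = some (tracks.getD k []) := by
          intro k hk hkc
          have hkc0 : PySem.Set.contains u (ids.getD k 0) = false := by
            rw [Bool.eq_false_iff] at hkc ⊢
            intro hc
            apply hkc
            rw [PySem.Set.contains_iff] at hc ⊢
            exact (PySem.Set.mem_add _ _ _).mpr (Or.inl hc)
          have hne_base : ids.getD k 0 ≠ base := by
            intro he
            rw [he, hub] at hkc0
            exact absurd hkc0 (by simp)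
          rw [PySem.Dict.get?_insert_of_ne _ _ hne_base]
          exact hinv k hk hkc0
        have h' := ih (a + 1) f (c ++ tracks.getD a []) (PySem.Set.add u (ids.getD a 0)) m
          (t.insert base (c ++ tracks.getD a [])) (by omega) (by omega) hub'
          (PySem.Dict.nodup_keys_insert _ _ _ hnd) (PySem.Dict.get?_insert_self _ _ _) hinv'
        push_cast at h'
        have h2 : ((↑a : Int) + 1 - 1) = (↑a : Int) := by ring
        rw [h2] at h'
        rw [h']
        rw [pv_insert_insert]
        have hchain : pvChain ids tracks (pvByStart tracks) (f + 1) c u ((↑a : Int) - 1)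
            = pvChain ids tracks (pvByStart tracks) f (c ++ tracks.getD a [])
                (PySem.Set.add u (ids.getD a 0)) (↑a : Int) := by
          rw [pvChain]
          have hfind : ((pvByStart tracks).getD (pvEndKey c) []).find?
              (fun k => decide (((↑a : Int) - 1) < k) && !(PySem.Set.contains u (PySem.List.pyGetD ids k 0)))
              = some (↑a : Int) := by
            apply pv_find?_sorted _ _ _ (pv_bucket_sorted tracks (pvEndKey c))
            · exact (pv_mem_bucket tracks (pvEndKey c) (↑a : Int)).mpr
                ⟨a, by omega, rfl, hne a haN, hkey.symm⟩
            · simp only [hga]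
              simp only [Bool.and_eq_true, decide_eq_true_eq, Bool.not_eq_true']
              exact ⟨by omega, hused'⟩
            · intro x hx hxa
              simp only [Bool.and_eq_false_iff, decide_eq_false_iff_not]
              left
              omega
          simp only [hfind]
          simp only [hga]
          congr 1
          simp
        rw [hchain]
      · -- mismatch: A skips index a; a is not in this bucket
        have hstep : pvAStep ids base (m.insert base c, u, t) (↑a) = (m.insert base c, u, t) := by
          rw [pvAStep]
          simp only [hga]
          rw [if_neg (by rw [hused']; exact Bool.false_ne_true)]
          simp only [hgbD, hgjD]
          rw [if_neg hkey]
        rw [hstep]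
        have h' := ih (a + 1) (f + 1) c u m t (by omega) (by omega) hub hnd hgb hinv
        push_cast at h'
        have h2 : ((↑a : Int) + 1 - 1) = (↑a : Int) := by ring
        rw [h2] at h'
        rw [h']
        rw [pv_chain_shift ids tracks f c u a (fun hmem => by
          obtain ⟨j, hj, hje, -, hsk⟩ := (pv_mem_bucket tracks (pvEndKey c) _).mp hmem
          have : j = a := by omega
          subst this
          exact absurd hsk.symm hkey)]

-- OUTER LEMMA: the two outer loops agree on the merged dict
lemma pvOuterEq (ids : List Int) (tracks : List (List (List Int)))
    (hlen : tracks.length = ids.length)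
    (hne : ∀ k, k < ids.length → tracks.getD k [] ≠ []) :
    ∀ (a : Nat) (m : pvTraj) (u : PySem.Set Int) (t : pvTraj),
      t.keys.Nodup →
      (∀ k, k < ids.length → PySem.Set.contains u (ids.getD k 0) = false →
        t.get? (ids.getD k 0) = some (tracks.getD k [])) →
      ((PySem.List.pyRange (↑a) (↑ids.length) 1).foldl (pvAOuter ids) (m, u, t)).1
        = ((PySem.List.pyRange (↑a) (↑ids.length) 1).foldl
            (fun s j => pvBOuter ids tracks (pvByStart tracks) s (j, PySem.List.pyGetD ids j 0)) (m, u)).1 := by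
  suffices H : ∀ (b a : Nat) (m : pvTraj) (u : PySem.Set Int) (t : pvTraj),
      ids.length - a = b →
      t.keys.Nodup →
      (∀ k, k < ids.length → PySem.Set.contains u (ids.getD k 0) = false →
        t.get? (ids.getD k 0) = some (tracks.getD k [])) →
      ((PySem.List.pyRange (↑a) (↑ids.length) 1).foldl (pvAOuter ids) (m, u, t)).1
        = ((PySem.List.pyRange (↑a) (↑ids.length) 1).foldl
            (fun s j => pvBOuter ids tracks (pvByStart tracks) s (j, PySem.List.pyGetD ids j 0)) (m, u)).1 by
    intro a m u t h1 h2
    exact H (ids.length - a) a m u t rfl h1 h2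
  intro b
  induction b with
  | zero =>
    intro a m u t hb hnd hinv
    have hna : ids.length ≤ a := by omega
    rw [PySem.List.pyRange_one_eq_nil (by exact_mod_cast hna)]
    rfl
  | succ n ih =>
    intro a m u t hb hnd hinv
    have haN : a < ids.length := by omega
    rw [PySem.List.pyRange_one_cons (by exact_mod_cast haN)]
    rw [List.foldl_cons, List.foldl_cons]
    have hga : PySem.List.pyGetD ids (↑a) 0 = ids.getD a 0 := by simp
    by_cases hused : PySem.Set.contains u (ids.getD a 0) = true
    · have hA : pvAOuter ids (m, u, t) (↑a) = (m, u, t) := by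
        rw [pvAOuter]
        simp only [hga]
        rw [if_pos hused]
      have hB : pvBOuter ids tracks (pvByStart tracks) (m, u) (↑a, PySem.List.pyGetD ids (↑a) 0)
          = (m, u) := by
        rw [pvBOuter]
        simp only [hga]
        rw [if_pos hused]
      rw [hA, hB]
      have h' := ih (a + 1) m u t (by omega) hnd hinv
      push_cast at h'
      exact h'
    · have hused' : PySem.Set.contains u (ids.getD a 0) = false := by
        simpa using hused
      have hgc : t.getD (ids.getD a 0) [] = tracks.getD a [] := by
        rw [PySem.Dict.getD_eq_get?_getD, hinv a haN hused']; rfl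
      have hub' : PySem.Set.contains (PySem.Set.add u (ids.getD a 0)) (ids.getD a 0) = true := by
        rw [PySem.Set.contains_iff]
        exact (PySem.Set.mem_add _ _ _).mpr (Or.inr rfl)
      have hinv' : ∀ k, k < ids.length →
          PySem.Set.contains (PySem.Set.add u (ids.getD a 0)) (ids.getD k 0) = false →
          t.get? (ids.getD k 0) = some (tracks.getD k []) := by
        intro k hk hkc
        apply hinv k hk
        rw [Bool.eq_false_iff] at hkc ⊢
        intro hc
        apply hkc
        rw [PySem.Set.contains_iff] at hc ⊢
        exact (PySem.Set.mem_add _ _ _).mpr (Or.inl hc)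
      have hA : pvAOuter ids (m, u, t) (↑a)
          = (PySem.List.pyRange ((↑a : Int) + 1) (↑ids.length) 1).foldl (pvAStep ids (ids.getD a 0))
              (m.insert (ids.getD a 0) (tracks.getD a []), PySem.Set.add u (ids.getD a 0), t) := by
        rw [pvAOuter]
        simp only [hga]
        rw [if_neg (by rw [hused']; exact Bool.false_ne_true)]
        simp only [hgc, PySem.List.len_eq]
      rw [hA]
      have hInner := pvInnerEq ids tracks hlen hne (ids.getD a 0) (a + 1) tracks.length
        (tracks.getD a []) (PySem.Set.add u (ids.getD a 0)) m t (by omega) hub' hnd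
        (hinv a haN hused') hinv'
      push_cast at hInner
      have h2 : ((↑a : Int) + 1 - 1) = (↑a : Int) := by ring
      rw [h2] at hInner
      rw [hInner]
      have hB : pvBOuter ids tracks (pvByStart tracks) (m, u) (↑a, PySem.List.pyGetD ids (↑a) 0)
          = (m.insert (ids.getD a 0)
               (pvChain ids tracks (pvByStart tracks) tracks.length (tracks.getD a [])
                 (PySem.Set.add u (ids.getD a 0)) (↑a)).1,
             (pvChain ids tracks (pvByStart tracks) tracks.length (tracks.getD a [])
                 (PySem.Set.add u (ids.getD a 0)) (↑a)).2) := by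
        rw [pvBOuter]
        simp only [hga]
        rw [if_neg (by rw [hused']; exact Bool.false_ne_true)]
        have hgt : PySem.List.pyGetD tracks (↑a) [] = tracks.getD a [] := by simp
        simp only [hgt]
      rw [hB]
      have hndX : (t.insert (ids.getD a 0)
          (pvChain ids tracks (pvByStart tracks) tracks.length (tracks.getD a [])
            (PySem.Set.add u (ids.getD a 0)) (↑a)).1).keys.Nodup :=
        PySem.Dict.nodup_keys_insert _ _ _ hnd
      have hinvX : ∀ k, k < ids.length →
          PySem.Set.contains (pvChain ids tracks (pvByStart tracks) tracks.length (tracks.getD a [])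
            (PySem.Set.add u (ids.getD a 0)) (↑a)).2 (ids.getD k 0) = false →
          (t.insert (ids.getD a 0)
            (pvChain ids tracks (pvByStart tracks) tracks.length (tracks.getD a [])
              (PySem.Set.add u (ids.getD a 0)) (↑a)).1).get? (ids.getD k 0)
            = some (tracks.getD k []) := by
        intro k hk hkc
        have hkadd : PySem.Set.contains (PySem.Set.add u (ids.getD a 0)) (ids.getD k 0) = false := by
          rw [Bool.eq_false_iff] at hkc ⊢
          intro hc
          exact hkc (pv_chain_mono ids tracks (pvByStart tracks) _ _ _ _ _ hc)
        have hkbase : ids.getD k 0 ≠ ids.getD a 0 := by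
          intro he
          rw [he, hub'] at hkadd
          simp at hkadd
        rw [PySem.Dict.get?_insert_of_ne _ _ hkbase]
        exact hinv' k hk hkadd
      have h' := ih (a + 1)
        (m.insert (ids.getD a 0)
          (pvChain ids tracks (pvByStart tracks) tracks.length (tracks.getD a [])
            (PySem.Set.add u (ids.getD a 0)) (↑a)).1)
        (pvChain ids tracks (pvByStart tracks) tracks.length (tracks.getD a [])
            (PySem.Set.add u (ids.getD a 0)) (↑a)).2
        (t.insert (ids.getD a 0)
          (pvChain ids tracks (pvByStart tracks) tracks.length (tracks.getD a [])
            (PySem.Set.add u (ids.getD a 0)) (↑a)).1)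
        (by omega) hndX hinvX
      push_cast at h'
      exact h'

-- ===== VERDICT (by name: the statement is the Claim_ definition above) =====
theorem merge_tracks_by_overlap_spec : Claim_equal_merge_tracks_by_overlap := by
  intro ts _hDom hPre
  obtain ⟨hnodup, hnem⟩ := hPre
  unfold Spec_merge_tracks_by_overlap
  rw [merge_tracks_by_overlap, merge_tracks_by_overlap_alt]
  have hkeys : (PySem.Dict.mk ts : pvTraj).keys = ts.map Prod.fst := rfl
  set ids : List Int := (PySem.Dict.mk ts : pvTraj).keys with hids
  set tracks : List (List (List Int)) :=
    ids.map (fun t => (PySem.Dict.mk ts : pvTraj).getD t []) with htracks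
  have hlids : ids.length = ts.length := by rw [hids]; simp [PySem.Dict.keys]
  have hlen : tracks.length = ids.length := by rw [htracks]; simp
  have hndk : ids.Nodup := hnodup
  have hget : ∀ k, (hk : k < ts.length) → (PySem.Dict.mk ts : pvTraj).get? (ts[k].1) = some (ts[k].2) := by
    intro k hk
    apply PySem.Dict.get?_of_mem_items
    · have : (ts[k].1, ts[k].2) = ts[k] := rfl
      rw [this]
      exact List.getElem_mem hk
    · exact hnodup
  have hida : ∀ k, (hk : k < ids.length) → ids.getD k 0 = (ts[k]'(by omega)).1 := by
    intro k hk
    rw [List.getD_eq_getElem _ _ hk]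
    simp [hids, PySem.Dict.keys]
  have htra : ∀ k, (hk : k < ids.length) → tracks.getD k [] = (ts[k]'(by omega)).2 := by
    intro k hk
    rw [List.getD_eq_getElem _ _ (by omega : k < tracks.length)]
    have hx : tracks[k]'(by omega) = (PySem.Dict.mk ts : pvTraj).getD ((ts[k]'(by omega)).1) [] := by
      simp [htracks, hids, PySem.Dict.keys]
    rw [hx, PySem.Dict.getD_eq_get?_getD, hget k (by omega)]
    rfl
  have hne : ∀ k, k < ids.length → tracks.getD k [] ≠ [] := by
    intro k hk
    rw [htra k hk]
    exact hnem _ (List.getElem_mem (by omega))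
  have hinv0 : ∀ k, k < ids.length →
      PySem.Set.contains PySem.Set.empty (ids.getD k 0) = false →
      (PySem.Dict.mk ts : pvTraj).get? (ids.getD k 0) = some (tracks.getD k []) := by
    intro k hk _
    rw [hida k hk, htra k hk]
    exact hget k (by omega)
  have houter := pvOuterEq ids tracks hlen hne 0 (PySem.Dict.mk [])
    PySem.Set.empty (PySem.Dict.mk ts) hnodup hinv0
  have hrw : PySem.List.enumerate ids 0
      = (PySem.List.pyRange 0 (PySem.List.len ids) 1).map (fun j => (j, PySem.List.pyGetD ids j 0)) :=
    PySem.List.enumerate_eq_map_pyRange ids 0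
  rw [hrw, List.foldl_map]
  have hzero : ((0 : Nat) : Int) = (0 : Int) := rfl
  have hlenr : PySem.List.len ids = ((ids.length : Nat) : Int) := by simp
  rw [hlenr]
  rw [show (0 : Int) = ((0 : Nat) : Int) from rfl] at houter ⊢
  exact congrArg PySem.Dict.items houter
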